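-- pv_equiv track=rewrite | github.com/enigm4tik/advent-of-code | 2023/day13.py | find_values
-- ===== SOURCE A (Python) =====
-- def find_values(pattern, direction):
--     """
--     Take a list of coordinates and sort them by either
--     columns or rows into a dictionary.
--     :param pattern: list of tuples (x, y)
--     :param direction: string, either 'horizontal' or 'vertical'
--     :return: dictionary representation of the pattern
--     """
--     representation = {}
--     for coord in pattern:
--         if direction == 'horizontal':
--             x, y = coord
--         else:
--             y, x = coord
--         try:
--             representation[y].append(x)
--         except KeyError:
--             representation[y] = [x]
--     sorted_representation = dict(sorted(representation.items()))
--     return sorted_representation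
-- ===== SOURCE B (Python) =====
-- def find_values(pattern, direction):
--     """
--     Group coordinates by row/column.  Instead of grouping first and sorting the
--     dict at the end, stable-sort the coordinates by the key component first and
--     group in a single pass: insertion order then already equals key order.
--     """
--     if direction == 'horizontal':
--         key, val = (lambda c: c[1]), (lambda c: c[0])
--     else:
--         key, val = (lambda c: c[0]), (lambda c: c[1])
--     representation = {}
--     for coord in sorted(pattern, key=key):
--         representation.setdefault(key(coord), []).append(val(coord))
--     return representation
-- ===== Notes on version B (the rewrite author's own statement) =====
-- stated objective: alternative
-- what changed: B stably sorts the coordinates by the key component first and groups them in one setdefault pass, so the dict is built already key-sorted and the final dict(sorted(...)) step disappears.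
import Mathlib
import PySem

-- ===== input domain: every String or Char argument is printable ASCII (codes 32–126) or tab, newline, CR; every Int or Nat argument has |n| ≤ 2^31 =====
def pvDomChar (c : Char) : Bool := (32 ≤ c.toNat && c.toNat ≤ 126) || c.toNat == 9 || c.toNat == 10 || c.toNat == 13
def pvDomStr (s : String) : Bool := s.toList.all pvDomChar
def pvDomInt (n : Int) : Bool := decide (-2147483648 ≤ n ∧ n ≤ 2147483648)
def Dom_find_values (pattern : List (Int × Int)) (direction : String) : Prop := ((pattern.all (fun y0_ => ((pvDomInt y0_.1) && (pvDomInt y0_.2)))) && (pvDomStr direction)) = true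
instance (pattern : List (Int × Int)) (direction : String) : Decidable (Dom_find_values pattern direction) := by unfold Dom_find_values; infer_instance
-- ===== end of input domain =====

-- B groups after a stable sort by the key coordinate instead of sorting the grouped dict afterwards.

-- ===== PORT A =====
-- A: group each coordinate into representation[y] (append-or-create), then return dict(sorted(items)).
-- The dict's keys are distinct, so Python's tuple-lexicographic sort of .items() is a sort by the key.
def find_values (pattern : List (Int × Int)) (direction : String) : List (Int × List Int) :=
  let representation := pattern.foldl (fun d coord =>
    let yx := if direction == "horizontal" then (coord.2, coord.1) else (coord.1, coord.2)
    d.modify yx.1 [] (fun v => v ++ [yx.2])) PySem.Dict.empty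
  PySem.List.sorted representation.items (fun p => p.1)

-- ===== PORT B =====
-- B: stable-sort the pattern by the key coordinate, then one setdefault/append grouping pass.
def find_values_alt (pattern : List (Int × Int)) (direction : String) : List (Int × List Int) :=
  let key : Int × Int → Int := fun c => if direction == "horizontal" then c.2 else c.1
  let val : Int × Int → Int := fun c => if direction == "horizontal" then c.1 else c.2
  ((PySem.List.sorted pattern key).foldl
    (fun d c => d.modify (key c) [] (fun v => v ++ [val c])) PySem.Dict.empty).items

-- ===== PRECONDITION & SPEC =====
def Spec_find_values (pattern : List (Int × Int)) (direction : String) (out : List (Int × List Int)) : Prop := out = find_values_alt pattern direction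
instance (pattern : List (Int × Int)) (direction : String) (out : List (Int × List Int)) : Decidable (Spec_find_values pattern direction out) := by unfold Spec_find_values; infer_instance

-- ===== CLAIM (what is proved, stated in full; the proofs are below) =====
def Claim_equal_find_values : Prop := ∀ (pattern : List (Int × Int)) (direction : String), Dom_find_values pattern direction → Spec_find_values pattern direction (find_values pattern direction)

-- ===== LEMMAS AND PROOFS =====

-- PySem.Set.ofList keeps the first occurrences in order, hence is a sublist of its input.
lemma foldl_add_sublist (xs acc : List Int) :
    List.Sublist (xs.foldl PySem.Set.add acc) (acc ++ xs) := by
  induction xs generalizing acc with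
  | nil => simp
  | cons x xs ih =>
    refine (ih (PySem.Set.add acc x)).trans ?_
    have h : List.Sublist (PySem.Set.add acc x) (acc ++ [x]) := by
      unfold PySem.Set.add; split
      · exact (List.sublist_append_left acc [x])
      · exact List.Sublist.refl _
    have := h.append (List.Sublist.refl xs)
    simpa using this

lemma ofList_sublist (xs : List Int) :
    List.Sublist (PySem.Set.ofList xs : List Int) xs := by
  simpa [PySem.Set.ofList, PySem.Set.empty] using foldl_add_sublist xs []

-- inserting x into a key-sorted list: the filter at any single key value gains x at the END iff key x = k
lemma filter_insertBy (key : Int × Int → Int) (k : Int) (x : Int × Int) :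
    ∀ (ys : List (Int × Int)), ys.Pairwise (fun a b => key a ≤ key b) →
    (PySem.List.insertBy (fun a b => decide (key a < key b)) x ys).filter (fun c => key c == k)
      = ys.filter (fun c => key c == k) ++ (if key x == k then [x] else []) := by
  intro ys
  induction ys with
  | nil =>
    intro _
    by_cases hk : key x = k <;> simp [PySem.List.insertBy, List.filter, hk]
  | cons y ys ih =>
    intro hp
    simp only [PySem.List.insertBy]
    by_cases hlt : key x < key y
    · simp only [hlt, decide_true, if_true]
      by_cases hk : key x = k
      · have hnone : List.filter (fun c => key c == k) (y :: ys) = [] := by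
          rw [List.filter_eq_nil_iff]
          intro c hc
          have hyc : key y ≤ key c := by
            rcases List.mem_cons.mp hc with rfl | hc'
            · exact le_refl _
            · exact (List.pairwise_cons.mp hp).1 c hc'
          simp only [beq_iff_eq]
          omega
        simp [hk, hnone]
      · have : (key x == k) = false := by simp [hk]
        simp [List.filter_cons, this]
    · simp only [hlt, decide_false, Bool.false_eq_true, if_false]
      rw [List.filter_cons, List.filter_cons,
        ih (List.pairwise_cons.mp hp).2]
      by_cases hy : (key y == k) = true <;> simp [hy]

-- STABILITY of Python's sort: filtering the sorted list at one key value gives the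
-- original elements of that key in their original order.
lemma filter_sorted (key : Int × Int → Int) (k : Int) (xs : List (Int × Int)) :
    (PySem.List.sorted xs key).filter (fun c => key c == k)
      = xs.filter (fun c => key c == k) := by
  induction xs using List.reverseRecOn with
  | nil =>
    rw [PySem.List.sorted_eq_foldl_insertBy]
    simp
  | append_singleton xs x ih =>
    have h1 : PySem.List.sorted (xs ++ [x]) key
        = PySem.List.insertBy (fun a b => decide (key a < key b)) x (PySem.List.sorted xs key) := by
      rw [PySem.List.sorted_eq_foldl_insertBy, PySem.List.sorted_eq_foldl_insertBy,
        List.foldl_append]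
      simp
    rw [h1, filter_insertBy key k x _ (PySem.List.sorted_pairwise xs key), ih,
      List.filter_append]
    by_cases hk : (key x == k) = true <;> simp [hk]

-- characterization of the grouping fold: items = first-occurrence keys, each with the
-- values of its coordinates in input order
lemma items_group (keyf valf : Int × Int → Int) (l : List (Int × Int)) :
    (l.foldl (fun d c => d.modify (keyf c) [] (fun v => v ++ [valf c])) PySem.Dict.empty).items
      = (PySem.Set.ofList (l.map keyf) : List Int).map
          (fun k => (k, (l.filter (fun c => keyf c == k)).map valf)) := by
  set d := l.foldl (fun d c => d.modify (keyf c) [] (fun v => v ++ [valf c])) PySem.Dict.empty with hd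
  have hkeys : d.keys = PySem.Set.ofList (l.map keyf) := by
    rw [hd, PySem.Dict.keys_foldl_modify_key l keyf [] (fun _ c v => v ++ [valf c]),
      PySem.Dict.keys_empty, PySem.Set.update_nil_left]
  have hnd : d.keys.Nodup := by rw [hkeys]; exact PySem.Set.nodup_ofList _
  rw [PySem.Dict.items_eq_map_keys d hnd [], hkeys]
  apply List.map_congr_left
  intro k _
  have hfold : d = (l.map (fun c => (keyf c, valf c))).foldl
      (fun d p => d.modify p.1 [] (fun v => v ++ [p.2])) PySem.Dict.empty := by
    rw [List.foldl_map]
  have : d.getD k [] = (l.filter (fun c => keyf c == k)).map valf := by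
    rw [hfold, PySem.Dict.getD_foldl_modify_append]
    simp [List.filter_map, Function.comp_def]
  simp [this]

-- main lemma: sort-after-group equals group-after-stable-sort
lemma main_eq (keyf valf : Int × Int → Int) (pattern : List (Int × Int)) :
    PySem.List.sorted
        ((pattern.foldl (fun d c => d.modify (keyf c) [] (fun v => v ++ [valf c]))
          PySem.Dict.empty).items) (fun p => p.1)
      = ((PySem.List.sorted pattern keyf).foldl
          (fun d c => d.modify (keyf c) [] (fun v => v ++ [valf c])) PySem.Dict.empty).items := by
  rw [items_group, items_group]
  have hR : (PySem.Set.ofList ((PySem.List.sorted pattern keyf).map keyf) : List Int).map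
        (fun k => (k, ((PySem.List.sorted pattern keyf).filter (fun c => keyf c == k)).map valf))
      = (PySem.Set.ofList ((PySem.List.sorted pattern keyf).map keyf) : List Int).map
        (fun k => (k, (pattern.filter (fun c => keyf c == k)).map valf)) := by
    apply List.map_congr_left
    intro k _
    rw [filter_sorted]
  rw [hR]
  apply PySem.List.sorted_eq_of_perm_of_pairwise_lt
  · apply List.Perm.map
    rw [List.perm_ext_iff_of_nodup (PySem.Set.nodup_ofList _) (PySem.Set.nodup_ofList _)]
    intro a
    constructor <;> intro h
    · rcases List.mem_map.mp ((PySem.Set.mem_ofList _ _).mp h) with ⟨c, hc, rfl⟩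
      exact (PySem.Set.mem_ofList _ _).mpr
        (List.mem_map.mpr ⟨c, (PySem.List.mem_sorted _ _ _ _).mp hc, rfl⟩)
    · rcases List.mem_map.mp ((PySem.Set.mem_ofList _ _).mp h) with ⟨c, hc, rfl⟩
      exact (PySem.Set.mem_ofList _ _).mpr
        (List.mem_map.mpr ⟨c, (PySem.List.mem_sorted _ _ _ _).mpr hc, rfl⟩)
  · have h2 : (PySem.Set.ofList ((PySem.List.sorted pattern keyf).map keyf) : List Int).Pairwise (· ≤ ·) :=
      (PySem.List.sorted_map_key_pairwise pattern keyf).sublist (ofList_sublist _)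
    have h3 : (PySem.Set.ofList ((PySem.List.sorted pattern keyf).map keyf) : List Int).Pairwise (· < ·) :=
      (h2.and (PySem.Set.nodup_ofList _)).imp (fun h => lt_of_le_of_ne h.1 h.2)
    rw [List.pairwise_map]
    exact h3

-- ===== VERDICT (by name: the statement is the Claim_ definition above) =====
theorem find_values_spec : Claim_equal_find_values := by
  intro pattern direction _
  show find_values pattern direction = find_values_alt pattern direction
  by_cases h : (direction == "horizontal") = true
  · simp only [find_values, find_values_alt, h, if_true]
    exact main_eq (fun c => c.2) (fun c => c.1) pattern
  · simp only [find_values, find_values_alt, h, Bool.false_eq_true, if_false]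
    exact main_eq (fun c => c.1) (fun c => c.2) pattern
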